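-- pv_equiv track=rewrite | github.com/catherinejo/travel-plan-adk | src/weekly_project_report/core/parse_tool.py | _extract_task_text_from_row
-- ===== SOURCE A (Python) =====
-- def _extract_task_text_from_row(cells: list[str], project_cell: str, summary_cell: str) -> str:
--     candidates = [summary_cell, project_cell]
--     candidates.extend(cells)
--     for text in candidates:
--         if not text:
--             continue
--         normalized = text.strip()
--         if normalized.startswith((">", "*", ":", "-")):
--             return normalized
--     for text in candidates:
--         if text and len(text.strip()) >= 2:
--             return text.strip()
--     return ""
-- ===== SOURCE B (Python) =====
-- def _extract_task_text_from_row(cells: list[str], project_cell: str, summary_cell: str) -> str: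
--     fallback = None
--     for text in [summary_cell, project_cell, *cells]:
--         if not text:
--             continue
--         normalized = text.strip()
--         if normalized.startswith((">", "*", ":", "-")):
--             return normalized
--         if fallback is None and len(normalized) >= 2:
--             fallback = normalized
--     return fallback if fallback is not None else ""
-- ===== Notes on version B (the rewrite author's own statement) =====
-- stated objective: simpler
-- what changed: A's two separate passes over the candidate list (markers first, then length-2 fallback) are folded into one loop that returns a marker immediately and records the first length-2 fallback in a variable, returned after the loop.
import Mathlib
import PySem

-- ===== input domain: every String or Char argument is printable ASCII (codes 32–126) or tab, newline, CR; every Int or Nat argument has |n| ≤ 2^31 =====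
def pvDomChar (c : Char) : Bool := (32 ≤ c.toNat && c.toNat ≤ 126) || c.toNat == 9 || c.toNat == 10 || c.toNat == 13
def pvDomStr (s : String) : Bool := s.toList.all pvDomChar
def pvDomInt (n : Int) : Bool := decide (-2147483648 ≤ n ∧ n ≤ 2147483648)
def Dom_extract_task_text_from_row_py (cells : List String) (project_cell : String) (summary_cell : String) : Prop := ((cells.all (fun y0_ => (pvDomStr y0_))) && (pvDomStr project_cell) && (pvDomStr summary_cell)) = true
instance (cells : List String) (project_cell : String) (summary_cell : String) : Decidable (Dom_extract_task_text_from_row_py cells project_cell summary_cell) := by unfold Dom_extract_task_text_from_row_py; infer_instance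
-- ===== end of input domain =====

-- B folds A's two passes over the candidate list into one loop with a `fallback` variable (simpler: one traversal, same priority).

-- ===== PORT A =====
-- normalized.startswith((">", "*", ":", "-"))
def pvMarker (n : String) : Bool :=
  PySem.Str.startswith n ">" || PySem.Str.startswith n "*" ||
  PySem.Str.startswith n ":" || PySem.Str.startswith n "-"

-- A's first loop: first non-empty text whose stripped form starts with a marker
def pvLoop1 : List String → Option String
  | [] => none
  | t :: rest =>
    if t = "" then pvLoop1 rest
    else
      let normalized := PySem.Str.strip t
      if pvMarker normalized then some normalized else pvLoop1 rest

-- A's second loop: first text with len(text.strip()) >= 2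
def pvLoop2 : List String → String
  | [] => ""
  | t :: rest =>
    if t ≠ "" && 2 ≤ PySem.Str.len (PySem.Str.strip t) then PySem.Str.strip t
    else pvLoop2 rest

def extract_task_text_from_row_py (cells : List String) (project_cell : String) (summary_cell : String) : String :=
  let candidates := summary_cell :: project_cell :: cells
  match pvLoop1 candidates with
  | some s => s
  | none => pvLoop2 candidates

-- ===== PORT B =====
-- B's single loop carrying the optional fallback
def pvLoopB : List String → Option String → String
  | [], fallback => fallback.getD ""
  | t :: rest, fallback =>
    if t = "" then pvLoopB rest fallback
    else
      let normalized := PySem.Str.strip t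
      if pvMarker normalized then normalized
      else pvLoopB rest
        (if fallback.isNone && 2 ≤ PySem.Str.len normalized then some normalized else fallback)

def extract_task_text_from_row_py_alt (cells : List String) (project_cell : String) (summary_cell : String) : String :=
  pvLoopB (summary_cell :: project_cell :: cells) none

-- ===== PRECONDITION & SPEC =====
def Spec_extract_task_text_from_row_py (cells : List String) (project_cell : String) (summary_cell : String) (out : String) : Prop := out = extract_task_text_from_row_py_alt cells project_cell summary_cell
instance (cells : List String) (project_cell : String) (summary_cell : String) (out : String) : Decidable (Spec_extract_task_text_from_row_py cells project_cell summary_cell out) := by unfold Spec_extract_task_text_from_row_py; infer_instance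

-- ===== CLAIM (what is proved, stated in full; the proofs are below) =====
def Claim_equal_extract_task_text_from_row_py : Prop := ∀ (cells : List String) (project_cell : String) (summary_cell : String), Dom_extract_task_text_from_row_py cells project_cell summary_cell → Spec_extract_task_text_from_row_py cells project_cell summary_cell (extract_task_text_from_row_py cells project_cell summary_cell)

-- ===== LEMMAS AND PROOFS =====
-- Loop invariant: B's single pass equals A's marker pass, falling back to the carried
-- fallback and then to A's second pass.
theorem pvLoopB_eq (l : List String) : ∀ fb : Option String,
    pvLoopB l fb = match pvLoop1 l with
      | some s => s
      | none => fb.getD (pvLoop2 l) := by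
  induction l with
  | nil => intro fb; cases fb <;> rfl
  | cons t rest ih =>
    intro fb
    by_cases ht : t = ""
    · simp [pvLoopB, pvLoop1, pvLoop2, ht, ih]
    · by_cases hm : pvMarker (PySem.Str.strip t) = true
      · simp [pvLoopB, pvLoop1, ht, hm]
      · by_cases hl : 2 ≤ (PySem.Chars.strip t.toList).length
        · cases fb with
          | none =>
            simp [pvLoopB, pvLoop1, pvLoop2, ht, hm, hl, ih]
          | some f =>
            simp [pvLoopB, pvLoop1, ht, hm, ih]
        · cases fb with
          | none => simp [pvLoopB, pvLoop1, pvLoop2, ht, hm, hl, ih]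
          | some f => simp [pvLoopB, pvLoop1, pvLoop2, ht, hm, hl, ih]

-- ===== VERDICT (by name: the statement is the Claim_ definition above) =====
theorem extract_task_text_from_row_py_spec : Claim_equal_extract_task_text_from_row_py := by
  intro cells project_cell summary_cell _
  unfold Spec_extract_task_text_from_row_py extract_task_text_from_row_py extract_task_text_from_row_py_alt
  rw [pvLoopB_eq]
  cases h : pvLoop1 (summary_cell :: project_cell :: cells) <;> simp [h]
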